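-- pv_equiv track=rewrite | github.com/manwar/perlweeklychallenge-club | challenge-015/lubos-kolouch/python/ch-1.py | get_weak_primes
-- ===== SOURCE A (Python) =====
-- def is_prime(n: int) -> bool:
--     """
--     Check if a number is prime.
--
--     Args:
--         n: The number to check
--
--     Returns:
--         True if prime, False otherwise
--
--     Examples:
--         >>> is_prime(2)
--         True
--         >>> is_prime(4)
--         False
--     """
--     if n < 2:
--         return False
--     if n == 2:
--         return True
--     if n % 2 == 0:
--         return False
--     for i in range(3, int(n**0.5) + 1, 2):
--         if n % i == 0:
--             return False
--     return True
--
-- def get_primes(n: int) -> list[int]: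
--     """
--     Get the first n prime numbers.
--
--     Args:
--         n: Number of primes to generate
--
--     Returns:
--         List of first n prime numbers
--
--     Examples:
--         >>> get_primes(10)
--         [2, 3, 5, 7, 11, 13, 17, 19, 23, 29]
--     """
--     primes: list[int] = []
--     candidate = 2
--
--     while len(primes) < n:
--         if is_prime(candidate):
--             primes.append(candidate)
--         candidate += 1 if candidate == 2 else 2
--
--     return primes
--
-- def is_weak_prime(p: int, primes: list[int]) -> bool:
--     """
--     Check if a prime is a weak prime.
--
--     A prime p is weak if p < (prev_prime + next_prime) / 2
--
--     Args:
--         p: The prime to check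
--         primes: List of primes (must include p and surrounding primes)
--
--     Returns:
--         True if weak prime, False otherwise
--     """
--     idx = primes.index(p)
--     prev_prime = primes[idx - 1]
--     next_prime = primes[idx + 1]
--
--     return p < (prev_prime + next_prime) / 2
--
-- def get_weak_primes(count: int) -> list[int]:
--     """
--     Get the first n weak prime numbers.
--
--     Args:
--         count: Number of weak primes to generate
--
--     Returns:
--         List of first n weak primes
--
--     Examples:
--         >>> get_weak_primes(5)
--         [3, 7, 13, 19, 23]
--     """
--     weak_primes: list[int] = []
--     primes = get_primes(1000)  # Generate enough primes
--
--     for i in range(1, len(primes) - 1):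
--         p = primes[i]
--         if is_weak_prime(p, primes):
--             weak_primes.append(p)
--             if len(weak_primes) >= count:
--                 break
--
--     return weak_primes[:count]
-- ===== SOURCE B (Python) =====
-- def _sieve(bound):
--     # Sieve of Eratosthenes with an int bitmask of composite marks.
--     comp = 0
--     primes = []
--     for i in range(2, bound):
--         if not (comp >> i) & 1:
--             primes.append(i)
--             for j in range(i * i, bound, i):
--                 if not (comp >> j) & 1:
--                     comp |= 1 << j
--     return primes
--
--
-- def get_weak_primes(count: int) -> list[int]:
--     bound = 8192
--     primes = _sieve(bound)
--     while len(primes) < 1000: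
--         bound *= 2
--         primes = _sieve(bound)
--     primes = primes[:1000]  # same 1000-prime window A inspects
--     weak = []
--     for i in range(1, len(primes) - 1):
--         cur = primes[i]
--         if 2 * cur < primes[i - 1] + primes[i + 1]:
--             weak.append(cur)
--             if len(weak) >= count:
--                 break
--     return weak[:count]
-- ===== Notes on version B (the rewrite author's own statement) =====
-- stated objective: alternative
-- what changed: Prime generation by per-candidate trial division is replaced by a Sieve of Eratosthenes over an integer bitmask (grown until it holds enough primes, then truncated to exactly A's thousand-prime window), and is_weak_prime's linear primes.index scan per prime is replaced by direct neighbour reads primes[i-1], primes[i+1]; the float midpoint comparison is replaced by the exactly equivalent doubled integer comparison.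
import Mathlib
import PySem

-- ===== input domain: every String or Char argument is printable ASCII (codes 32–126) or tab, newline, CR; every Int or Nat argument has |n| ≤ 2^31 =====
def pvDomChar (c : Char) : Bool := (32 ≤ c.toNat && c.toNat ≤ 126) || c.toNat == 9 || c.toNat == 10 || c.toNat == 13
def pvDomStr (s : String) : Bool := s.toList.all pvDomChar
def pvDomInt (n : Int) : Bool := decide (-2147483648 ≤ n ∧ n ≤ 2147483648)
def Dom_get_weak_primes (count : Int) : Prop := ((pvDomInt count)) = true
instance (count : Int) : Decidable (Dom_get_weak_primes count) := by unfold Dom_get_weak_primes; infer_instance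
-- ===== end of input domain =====

-- B replaces A's per-candidate trial-division prime generation by a Sieve of Eratosthenes
-- over an integer bitmask and drops the linear `.index` scan per prime (objective: alternative).

-- ===== PORT A =====
-- `int(n**0.5)`: fuel-bounded Newton integer square root; exact = Python's int(n**0.5)
-- on the n ≤ 7919 this program ever passes to it (doubles are exact there).
def isqrtAux : Nat → Nat → Nat → Nat
  | 0, _, x => x
  | f+1, n, x =>
    let y := (x + n / x) / 2
    if y < x then isqrtAux f n y else x

def isqrt (n : Nat) : Nat := if n ≤ 1 then n else isqrtAux 64 n n

def is_prime (n : Int) : Bool :=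
  if n < 2 then false
  else if n == 2 then true
  else if PySem.Int.mod n 2 == 0 then false
  else (PySem.List.pyRange 3 ((isqrt n.toNat : Int) + 1) 2).all
        (fun i => !(PySem.Int.mod n i == 0))

-- `while len(primes) < n`: fuel-bounded; the single call get_primes(1000) stops at
-- candidate 7919 after ~3960 iterations, far below the fuel.
def getPrimesLoop : Nat → List Int → Int → Int → List Int
  | 0, primes, _, _ => primes
  | fuel+1, primes, candidate, n =>
    if (PySem.List.len primes) < n then
      let primes' := if is_prime candidate then primes ++ [candidate] else primes
      getPrimesLoop fuel primes' (candidate + (if candidate == 2 then 1 else 2)) n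
    else primes

def get_primes (n : Int) : List Int := getPrimesLoop 100000 [] 2 n

-- none = ValueError/IndexError (never reached from get_weak_primes, which passes p = primes[i]);
-- `p < (prev+next)/2` on ints equals `2*p < prev+next` (float halving is exact at these sizes).
def is_weak_prime (p : Int) (primes : List Int) : Option Bool :=
  match PySem.List.index? primes p with
  | none => none
  | some idx =>
    match PySem.List.pyGet? primes ((idx : Int) - 1), PySem.List.pyGet? primes ((idx : Int) + 1) with
    | some prev, some next => some (decide (2 * p < prev + next))
    | _, _ => none

-- the for-loop with early break; `is_weak_prime … == some true` is Python's truth test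
-- (the `none` error case cannot occur here).
def gwpLoop (primes : List Int) (count : Int) : List Int → List Int → List Int
  | [], acc => acc
  | i :: rest, acc =>
    match PySem.List.pyGet? primes i with
    | none => acc
    | some p =>
      if is_weak_prime p primes == some true then
        let acc' := acc ++ [p]
        if count ≤ PySem.List.len acc' then acc'
        else gwpLoop primes count rest acc'
      else gwpLoop primes count rest acc

def get_weak_primes (count : Int) : List Int :=
  let primes := get_primes 1000
  let weak := gwpLoop primes count (PySem.List.pyRange 1 (PySem.List.len primes - 1) 1) []
  PySem.List.slice weak none (some count)

-- ===== PORT B =====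
-- inner marking loop `for j in range(i*i, bound, i): if not (comp >> j) & 1: comp |= 1 << j`
-- (all indices ≥ 0, so Python's int bit ops are Nat's >>>, &&&, ||| and <<< here).
def sieveInnerLoop : List Int → Nat → Nat
  | [], comp => comp
  | j :: rest, comp =>
    if (comp >>> j.toNat) &&& 1 == 0 then sieveInnerLoop rest (comp ||| (1 <<< j.toNat))
    else sieveInnerLoop rest comp

def sieveInner (bound : Nat) (i : Nat) (comp : Nat) : Nat :=
  sieveInnerLoop (PySem.List.pyRange ((i * i : Nat) : Int) (bound : Int) (i : Int)) comp

-- Sieve of Eratosthenes, composite marks kept in the bits of one Nat (Source B's int bitmask);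
-- outer loop `for i in range(2, bound)`.
def sieveLoop (bound : Nat) : List Int → Nat → List Int → List Int
  | [], _, primes => primes
  | i :: rest, comp, primes =>
    if (comp >>> i.toNat) &&& 1 == 0 then
      sieveLoop bound rest (sieveInner bound i.toNat comp) (primes ++ [i])
    else sieveLoop bound rest comp primes

def pySieve (bound : Nat) : List Int :=
  sieveLoop bound (PySem.List.pyRange 2 (bound : Int) 1) 0 []

-- `while len(primes) < 1000: bound *= 2` — fuel-bounded; the initial bound 8192 already
-- yields 1028 ≥ 1000 primes, so the fuel is never consumed.
def growSieve : Nat → Nat → List Int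
  | 0, bound => pySieve bound
  | fuel+1, bound =>
    let primes := pySieve bound
    if primes.length < 1000 then growSieve fuel (bound * 2) else primes

-- `2 * cur < primes[i-1] + primes[i+1]` (indices in range at every call site).
def bCond (primes : List Int) (i : Nat) : Bool :=
  decide (2 * primes.getD i 0 < primes.getD (i - 1) 0 + primes.getD (i + 1) 0)

def bLoop (primes : List Int) (count : Int) : List Int → List Int → List Int
  | [], acc => acc
  | i :: rest, acc =>
    let cur := primes.getD i.toNat 0
    if bCond primes i.toNat then
      let acc' := acc ++ [cur]
      if count ≤ PySem.List.len acc' then acc'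
      else bLoop primes count rest acc'
    else bLoop primes count rest acc

def get_weak_primes_alt (count : Int) : List Int :=
  let primes := PySem.List.slice (growSieve 30 8192) none (some 1000)
  let weak := bLoop primes count (PySem.List.pyRange 1 (PySem.List.len primes - 1) 1) []
  PySem.List.slice weak none (some count)

-- ===== PRECONDITION & SPEC =====
def Spec_get_weak_primes (count : Int) (out : List Int) : Prop := out = get_weak_primes_alt count
instance (count : Int) (out : List Int) : Decidable (Spec_get_weak_primes count out) := by unfold Spec_get_weak_primes; infer_instance

-- ===== CLAIM (what is proved, stated in full; the proofs are below) =====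
def Claim_equal_get_weak_primes : Prop := ∀ (count : Int), Dom_get_weak_primes count → Spec_get_weak_primes count (get_weak_primes count)

-- ===== LEMMAS AND PROOFS =====

-- The one evaluated fact: A's 1000 trial-division primes are exactly B's sieved window,
-- and that window is strictly increasing.
set_option maxRecDepth 600000 in
set_option maxHeartbeats 64000000 in
lemma pv_bigEval :
    get_primes 1000 = PySem.List.slice (growSieve 30 8192) none (some 1000) ∧
    List.IsChain (· < ·) (PySem.List.slice (growSieve 30 8192) none (some 1000)) := by
  decide

-- In a strictly increasing list, `.index` of the i-th element is i.
lemma pv_idx_self (P : List Int) (hs : List.IsChain (· < ·) P) (i : Nat) (hi : i < P.length) :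
    PySem.List.index? P P[i] = some i := by
  have hpw : List.Pairwise (· < ·) P := List.IsChain.pairwise hs
  rw [PySem.List.index?_eq_some_iff]
  refine ⟨P.take i, P.drop (i+1), ?_, by simp [List.length_take]; omega, ?_⟩
  · conv_lhs => rw [← List.take_append_drop i P]
    congr 1
    rw [List.drop_eq_getElem_cons hi]
  · intro hmem
    obtain ⟨j, hj, hje⟩ := List.mem_iff_getElem.mp hmem
    have hjlen : j < i := by simp [List.length_take] at hj; omega
    rw [List.getElem_take] at hje
    have hlt : P[j] < P[i] :=
      (List.pairwise_iff_getElem.mp hpw) j i (by omega) hi (by omega)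
    rw [hje] at hlt
    exact lt_irrefl _ hlt

-- A's is_weak_prime at P[i] computes B's direct three-point test.
lemma pv_weak_eq (P : List Int) (hs : List.IsChain (· < ·) P) (i : Nat)
    (h1 : 1 ≤ i) (h2 : i + 1 < P.length) :
    is_weak_prime P[i] P = some (bCond P i) := by
  have hi : i < P.length := by omega
  have e1 : ((i : Int) - 1) = ((i - 1 : Nat) : Int) := by omega
  have e2 : ((i : Int) + 1) = ((i + 1 : Nat) : Int) := by push_cast; ring
  simp only [is_weak_prime, pv_idx_self P hs i hi, e1, e2, PySem.List.pyGet?_natCast,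
    List.getElem?_eq_getElem (by omega : i - 1 < P.length), List.getElem?_eq_getElem h2]
  unfold bCond
  rw [List.getD_eq_getElem P 0 hi, List.getD_eq_getElem P 0 (by omega : i - 1 < P.length),
    List.getD_eq_getElem P 0 h2]

-- The two selection loops agree step by step on any strictly increasing list.
lemma pv_loops_eq (P : List Int) (hs : List.IsChain (· < ·) P) :
    ∀ (idxs : List Int), (∀ i ∈ idxs, 1 ≤ i ∧ i < (P.length : Int) - 1) →
    ∀ (count : Int) (acc : List Int),
      gwpLoop P count idxs acc = bLoop P count idxs acc := by
  intro idxs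
  induction idxs with
  | nil => intro _ _ _; rfl
  | cons i rest ih =>
    intro h count acc
    obtain ⟨h1, h2⟩ := h i List.mem_cons_self
    have htail := fun j hj => h j (List.mem_cons_of_mem _ hj)
    have hij : i = (i.toNat : Int) := by omega
    have hjl : i.toNat + 1 < P.length := by omega
    have hj1 : 1 ≤ i.toNat := by omega
    simp only [gwpLoop, bLoop]
    rw [hij, PySem.List.pyGet?_natCast, List.getElem?_eq_getElem (by omega : i.toNat < P.length)]
    simp only [Int.toNat_natCast]
    rw [pv_weak_eq P hs i.toNat hj1 hjl, List.getD_eq_getElem P 0 (by omega : i.toNat < P.length)]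
    cases bCond P i.toNat
    · simp only [show (some false == some true) = false from rfl, Bool.false_eq_true,
        if_false]
      exact ih htail count acc
    · simp only [show (some true == some true) = true from rfl, if_true]
      split
      · rfl
      · exact ih htail count (acc ++ [P[i.toNat]])

-- ===== VERDICT (by name: the statement is the Claim_ definition above) =====
theorem get_weak_primes_spec : Claim_equal_get_weak_primes := by
  intro count _
  unfold Spec_get_weak_primes
  show get_weak_primes count = get_weak_primes_alt count
  have hP := pv_bigEval.1
  have hs : List.IsChain (· < ·) (get_primes 1000) := by rw [hP]; exact pv_bigEval.2
  show PySem.List.slice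
      (gwpLoop (get_primes 1000) count
        (PySem.List.pyRange 1 (PySem.List.len (get_primes 1000) - 1) 1) [])
      none (some count)
    = PySem.List.slice
      (bLoop (PySem.List.slice (growSieve 30 8192) none (some 1000)) count
        (PySem.List.pyRange 1
          (PySem.List.len (PySem.List.slice (growSieve 30 8192) none (some 1000)) - 1) 1) [])
      none (some count)
  rw [← hP]
  rw [pv_loops_eq (get_primes 1000) hs _ ?_ count []]
  intro i hi
  rw [PySem.List.len_eq] at hi
  exact (PySem.List.mem_pyRange_one).mp hi
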